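-- pv_equiv track=rewrite | github.com/liboyin/algo-prac | arrays/min_max_diff.py | search
-- ===== SOURCE A (Python) =====
-- def search(arr, k):
--     """
--     Given an array of numbers, and a number k. For each element in arr, either increase its value by k, or decrease
--         its value by k. Choose directions of update, s.t. the maximum difference between any two elements in the
--         resulting array is minimised.
--     Observation: In the sorted array there must be such a boundary, to whose left all numbers are increased, and to
--         whose right all numbers are decreased.
--     Time complexity is O(n).
--     :param arr: list[num]
--     :param k: num
--     :return: num
--     """
--     n = len(arr)
--     if n <= 1:
--         return 0
--     if k == 0:
--         return max(arr) - min(arr)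
--     if k < 0:
--         return search(arr, -k)
--     a = [x - k for x in sorted(arr)]
--     a_min, a_max = a[0], a[-1]
--     min_diff = a_max - a_min
--     for i in range(n):
--         a[i] += k * 2
--         if a_min == a[i] - k * 2:  # a[i] was the minimum
--             a_min = a[0] if i == n - 1 else min(a[0], a[i+1])  # rolling min
--         a_max = max(a_max, a[i])
--         min_diff = min(min_diff, a_max - a_min)
--     return min_diff
-- ===== SOURCE B (Python) =====
-- def search(arr, k):
--     n = len(arr)
--     if n <= 1:
--         return 0
--     if k == 0:
--         return max(arr) - min(arr)
--     if k < 0: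
--         return search(arr, -k)
--     s = sorted(arr)
--     res = s[-1] - s[0]
--     for i in range(n - 1):
--         hi = max(s[-1] - k, s[i] + k)
--         lo = min(s[0] + k, s[i + 1] - k)
--         res = min(res, hi - lo)
--     return res
-- ===== Notes on version B (the rewrite author's own statement) =====
-- stated objective: simpler
-- what changed: B drops A's in-place array mutation and rolling min/max bookkeeping: after sorting it takes s[-1]-s[0] as the baseline and, for each split boundary i, computes the resulting spread directly from the closed forms max(s[-1]-k, s[i]+k) and min(s[0]+k, s[i+1]-k).
import Mathlib
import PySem

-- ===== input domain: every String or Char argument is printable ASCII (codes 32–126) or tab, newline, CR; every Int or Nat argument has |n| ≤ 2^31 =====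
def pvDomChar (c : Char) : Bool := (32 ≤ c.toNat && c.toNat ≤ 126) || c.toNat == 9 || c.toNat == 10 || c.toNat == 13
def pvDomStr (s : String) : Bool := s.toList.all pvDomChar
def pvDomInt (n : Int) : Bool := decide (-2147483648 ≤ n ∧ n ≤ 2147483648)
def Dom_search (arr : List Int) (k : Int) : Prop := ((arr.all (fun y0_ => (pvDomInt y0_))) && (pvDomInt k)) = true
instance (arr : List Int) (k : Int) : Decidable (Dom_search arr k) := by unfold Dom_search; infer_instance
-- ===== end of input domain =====

-- B replaces A's in-place array mutation and rolling min/max state with closed-form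
-- prefix-min / suffix-max expressions over the sorted list (objective: simpler; same cost).

-- ===== PORT A =====
-- loop body of A (state: (a, a_min, a_max, min_diff)); every index read or written
-- lies in range(n), so the total pyGetD/pySetD forms are exact here
def stepA (n k : Int) (st : List Int × Int × Int × Int) (i : Int) : List Int × Int × Int × Int :=
  let a := PySem.List.pySetD st.1 i (PySem.List.pyGetD st.1 i 0 + k * 2)   -- a[i] += k * 2
  let aMin := if st.2.1 = PySem.List.pyGetD a i 0 - k * 2 then             -- a[i] was the minimum
      (if i = n - 1 then PySem.List.pyGetD a 0 0
       else min (PySem.List.pyGetD a 0 0) (PySem.List.pyGetD a (i + 1) 0))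
    else st.2.1
  let aMax := max st.2.2.1 (PySem.List.pyGetD a i 0)
  (a, aMin, aMax, min st.2.2.2 (aMax - aMin))

def search (arr : List Int) (k : Int) : Int :=
  let n : Int := arr.length
  if n ≤ 1 then 0
  else if k = 0 then
    (PySem.List.max? arr (fun x => x)).getD 0 - (PySem.List.min? arr (fun x => x)).getD 0
  else if k < 0 then search arr (-k)
  else
    let a := (PySem.List.sorted arr (fun x => x) false).map (fun x => x - k)
    let aMin := PySem.List.pyGetD a 0 0       -- a[0]  (n ≥ 2 here, in range)
    let aMax := PySem.List.pyGetD a (-1) 0    -- a[-1]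
    let st := (PySem.List.pyRange 0 n 1).foldl (stepA n k) (a, aMin, aMax, aMax - aMin)
    st.2.2.2
termination_by (if k < 0 then 1 else 0 : Nat)
decreasing_by simp_all; omega

-- ===== PORT B =====
-- loop body of B: hi = closed-form suffix max, lo = closed-form prefix min
def stepB (s : List Int) (k : Int) (res : Int) (i : Int) : Int :=
  let hi := max (PySem.List.pyGetD s (-1) 0 - k) (PySem.List.pyGetD s i 0 + k)
  let lo := min (PySem.List.pyGetD s 0 0 + k) (PySem.List.pyGetD s (i + 1) 0 - k)
  min res (hi - lo)

def search_alt (arr : List Int) (k : Int) : Int :=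
  let n : Int := arr.length
  if n ≤ 1 then 0
  else if k = 0 then
    (PySem.List.max? arr (fun x => x)).getD 0 - (PySem.List.min? arr (fun x => x)).getD 0
  else if k < 0 then search_alt arr (-k)
  else
    let s := PySem.List.sorted arr (fun x => x) false
    let res := PySem.List.pyGetD s (-1) 0 - PySem.List.pyGetD s 0 0
    (PySem.List.pyRange 0 (n - 1) 1).foldl (stepB s k) res
termination_by (if k < 0 then 1 else 0 : Nat)
decreasing_by simp_all; omega

-- ===== PRECONDITION & SPEC =====
def Spec_search (arr : List Int) (k : Int) (out : Int) : Prop := out = search_alt arr k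
instance (arr : List Int) (k : Int) (out : Int) : Decidable (Spec_search arr k out) := by unfold Spec_search; infer_instance

-- ===== CLAIM (what is proved, stated in full; the proofs are below) =====
def Claim_equal_search : Prop := ∀ (arr : List Int) (k : Int), Dom_search arr k → Spec_search arr k (search arr k)

-- ===== LEMMAS AND PROOFS =====

-- A's mutated array after the first i iterations of its loop
def formA (s : List Int) (k : Int) (i : Nat) : List Int :=
  (s.take i).map (fun x => x + k) ++ (s.drop i).map (fun x => x - k)

lemma formA_read (s : List Int) (k : Int) (i j : Nat) (hj : j < s.length) :
    PySem.List.pyGetD (formA s k i) (j : Int) 0 =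
      if j < i then s.getD j 0 + k else s.getD j 0 - k := by
  rw [PySem.List.pyGetD_natCast]
  unfold formA
  rcases lt_or_ge j i with h | h
  · have h1 : j < ((s.take i).map (fun x => x + k)).length := by
      simp [List.length_take]; omega
    rw [List.getD_eq_getElem _ _ (by simp [List.length_take]; omega),
        List.getElem_append_left h1]
    simp [List.getElem?_eq_getElem hj, h]
  · have h1 : ((s.take i).map (fun x => x + k)).length ≤ j := by simp; omega
    rw [List.getD_eq_getElem _ _ (by simp [List.length_take]; omega),
        List.getElem_append_right h1]
    have : ¬ j < i := by omega
    simp [List.getElem?_eq_getElem hj, this]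
    congr 1
    omega

lemma formA_set (s : List Int) (k : Int) (i : Nat) (hi : i < s.length) :
    PySem.List.pySetD (formA s k i) (i : Int) (s.getD i 0 + k) = formA s k (i + 1) := by
  rw [PySem.List.pySetD_natCast]
  unfold formA
  have hl : ((s.take i).map (fun x => x + k)).length = i := by simp; omega
  rw [List.set_append, hl]
  simp only [lt_irrefl, if_false, Nat.sub_self]
  rw [List.drop_eq_getElem_cons hi, List.take_add_one]
  simp [List.getElem?_eq_getElem hi]
  have hd : i < (List.map (fun x => x - k) s).length := by simpa using hi
  have hf : i < (List.map (fun x => x + k) s).length := by simpa using hi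
  rw [List.drop_eq_getElem_cons hd, List.take_add_one, List.getElem?_eq_getElem hf]
  simp

-- one iteration of A's loop, evaluated on the invariant shape of the state
lemma stepA_eval (s : List Int) (k : Int) (i : Nat) (hi : i < s.length)
    (m M d : Int) :
    stepA (s.length : Int) k (formA s k i, m, M, d) (i : Int) =
      (formA s k (i+1),
       (if m = s.getD i 0 - k then
          (if i = s.length - 1 then s.getD 0 0 + k
           else min (s.getD 0 0 + k) (s.getD (i+1) 0 - k))
        else m),
       max M (s.getD i 0 + k),
       min d (max M (s.getD i 0 + k) -
         (if m = s.getD i 0 - k then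
            (if i = s.length - 1 then s.getD 0 0 + k
             else min (s.getD 0 0 + k) (s.getD (i+1) 0 - k))
          else m))) := by
  have hread : PySem.List.pyGetD (formA s k i) (i:Int) 0 = s.getD i 0 - k := by
    rw [formA_read s k i i hi]; simp
  have hset : PySem.List.pySetD (formA s k i) (i:Int) (s.getD i 0 - k + k*2) = formA s k (i + 1) := by
    have hval : s.getD i 0 - k + k*2 = s.getD i 0 + k := by ring
    rw [hval]; exact formA_set s k i hi
  have hread2 : PySem.List.pyGetD (formA s k (i+1)) (i:Int) 0 = s.getD i 0 + k := by
    rw [formA_read s k (i+1) i hi]; simp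
  have hread0 : PySem.List.pyGetD (formA s k (i+1)) (0:Int) 0 = s.getD 0 0 + k := by
    have := formA_read s k (i+1) 0 (by omega)
    simpa using this
  have harith : s.getD i 0 + k - k * 2 = s.getD i 0 - k := by ring
  unfold stepA
  simp only [hread, hset, hread2, hread0, harith]
  by_cases hm : m = s.getD i 0 - k
  · simp only [hm]
    by_cases hl : i = s.length - 1
    · have hll : ((s.length - 1 : Nat) : Int) = (s.length:Int) - 1 := by omega
      simp [hl, hll]
    · have hl' : ¬ ((i:Int) = (s.length:Int) - 1) := by omega
      have hi1 : i + 1 < s.length := by omega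
      have hcast : (i:Int) + 1 = ((i+1 : Nat):Int) := by push_cast; ring
      rw [if_neg hl', if_neg hl, hcast, formA_read s k (i+1) (i+1) hi1]
      simp
  · rw [if_neg hm, if_neg hm]

-- one iteration of B's loop, with the index reads spelled out
lemma stepB_eval (s : List Int) (k : Int) (i : Nat) (hi : i + 1 < s.length) (res : Int) :
    stepB s k res (i : Int) =
      min res (max (s.getD (s.length - 1) 0 - k) (s.getD i 0 + k) -
               min (s.getD 0 0 + k) (s.getD (i+1) 0 - k)) := by
  unfold stepB
  have h1 : PySem.List.pyGetD s (-1) 0 = s.getD (s.length - 1) 0 := by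
    rw [PySem.List.pyGetD_neg_ofNat s 1 0 (by omega) (by omega),
        List.getD_eq_getElem _ _ (by omega)]
  have h2 : PySem.List.pyGetD s (0:Int) 0 = s.getD 0 0 := by
    simp [PySem.List.pyGetD_zero]
  have h3 : PySem.List.pyGetD s (i:Int) 0 = s.getD i 0 := by
    simp [PySem.List.pyGetD_natCast]
  have h4 : PySem.List.pyGetD s ((i:Int)+1) 0 = s.getD (i+1) 0 := by
    have hcast : (i:Int) + 1 = ((i+1 : Nat):Int) := by push_cast; ring
    rw [hcast]; exact PySem.List.pyGetD_natCast s (i+1) 0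
  rw [h1, h2, h3, h4]

-- the loop invariant: after i iterations A's state is (formA i, prefix-min, suffix-max, B's res)
lemma invA (s : List Int) (k : Int) (hn : 2 ≤ s.length)
    (hmono : ∀ p q : Nat, p ≤ q → q < s.length → s.getD p 0 ≤ s.getD q 0) :
    ∀ i : Nat, 1 ≤ i → i ≤ s.length - 1 →
    (PySem.List.pyRange 0 (i:Int) 1).foldl (stepA (s.length:Int) k)
        (formA s k 0, s.getD 0 0 - k, s.getD (s.length-1) 0 - k,
         s.getD (s.length-1) 0 - s.getD 0 0)
      = (formA s k i,
         min (s.getD 0 0 + k) (s.getD i 0 - k),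
         max (s.getD (s.length-1) 0 - k) (s.getD (i-1) 0 + k),
         (PySem.List.pyRange 0 (i:Int) 1).foldl (stepB s k)
           (s.getD (s.length-1) 0 - s.getD 0 0)) := by
  intro i
  induction i with
  | zero => intro h1 _; omega
  | succ i ih =>
    intro _ h2
    have hcast : ((i+1 : Nat):Int) = (i:Int) + 1 := by push_cast; ring
    have hsplit : PySem.List.pyRange 0 ((i+1 : Nat):Int) 1
        = PySem.List.pyRange 0 (i:Int) 1 ++ [(i:Int)] := by
      rw [hcast]; exact PySem.List.pyRange_one_succ_right (by omega)
    rw [hsplit, List.foldl_append, List.foldl_append]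
    by_cases h1 : i = 0
    · subst h1
      have hnil : PySem.List.pyRange 0 ((0:Nat):Int) 1 = [] :=
        PySem.List.pyRange_one_eq_nil (by simp)
      rw [hnil]
      simp only [List.foldl_nil, List.foldl_cons]
      rw [stepA_eval s k 0 (by omega), stepB_eval s k 0 (by omega)]
      have h00 : ¬ ((0:Nat) = s.length - 1) := by omega
      rw [if_pos rfl, if_neg h00]
    · rw [ih (by omega) (by omega), List.foldl_cons, List.foldl_nil,
          List.foldl_cons, List.foldl_nil,
          stepA_eval s k i (by omega), stepB_eval s k i (by omega)]
      have e1 : s.getD i 0 ≤ s.getD (i+1) 0 := hmono i (i+1) (by omega) (by omega)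
      have hne : ¬ (i = s.length - 1) := by omega
      rw [if_neg hne]
      have hmin : (if min (s.getD 0 0 + k) (s.getD i 0 - k) = s.getD i 0 - k then
            min (s.getD 0 0 + k) (s.getD (i+1) 0 - k)
          else min (s.getD 0 0 + k) (s.getD i 0 - k))
          = min (s.getD 0 0 + k) (s.getD (i+1) 0 - k) := by
        split_ifs with h <;> omega
      have e2 : s.getD (i-1) 0 ≤ s.getD i 0 := hmono (i-1) i (by omega) (by omega)
      have hmax : max (max (s.getD (s.length-1) 0 - k) (s.getD (i-1) 0 + k)) (s.getD i 0 + k)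
          = max (s.getD (s.length-1) 0 - k) (s.getD i 0 + k) := by omega
      rw [hmin, hmax]
      simp

lemma stepB_le (s : List Int) (k : Int) (l : List Int) (res : Int) :
    l.foldl (stepB s k) res ≤ res := by
  induction l generalizing res with
  | nil => exact le_refl _
  | cons x t ih => exact le_trans (ih _) (min_le_left _ _)

lemma mono_of_pairwise (s : List Int) (hp : s.Pairwise (fun a b => a ≤ b)) :
    ∀ p q : Nat, p ≤ q → q < s.length → s.getD p 0 ≤ s.getD q 0 := by
  intro p q hpq hq
  rcases eq_or_lt_of_le hpq with rfl | hlt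
  · exact le_refl _
  · have h := List.pairwise_iff_getElem.mp hp p q (by omega) hq hlt
    rw [List.getD_eq_getElem _ _ (by omega), List.getD_eq_getElem _ _ hq]
    exact h

lemma main_pos (arr : List Int) (k : Int) (hk : 0 < k) (hn : 2 ≤ arr.length) :
    search arr k = search_alt arr k := by
  have hn1 : ¬ ((arr.length : Int) ≤ 1) := by omega
  have hk0 : ¬ (k = 0) := by omega
  have hkneg : ¬ (k < 0) := by omega
  rw [search, search_alt]
  simp only [if_neg hn1, if_neg hk0, if_neg hkneg]
  set s := PySem.List.sorted arr (fun x => x) false with hs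
  have hslen : s.length = arr.length := PySem.List.length_sorted ..
  have hsne : 0 < s.length := by omega
  have hmono : ∀ p q : Nat, p ≤ q → q < s.length → s.getD p 0 ≤ s.getD q 0 := by
    apply mono_of_pairwise
    have := PySem.List.sorted_pairwise arr (fun x => x)
    simpa using this
  have haMin : PySem.List.pyGetD (s.map (fun x => x - k)) 0 0 = s.getD 0 0 - k := by
    rw [PySem.List.pyGetD_zero, List.getD_eq_getElem _ _ (by simpa using hsne),
        List.getElem_map, List.getD_eq_getElem _ _ hsne]
  have haMax : PySem.List.pyGetD (s.map (fun x => x - k)) (-1) 0 = s.getD (s.length - 1) 0 - k := by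
    rw [PySem.List.pyGetD_neg_ofNat _ 1 0 (by omega) (by simp; omega)]
    rw [List.getElem_map, List.getD_eq_getElem _ _ (by omega)]
    simp
  have ha0 : (s.map (fun x => x - k)) = formA s k 0 := by simp [formA]
  have hcast1 : ((arr.length : Int)) = ((s.length - 1 : Nat) : Int) + 1 := by omega
  have hsplit : PySem.List.pyRange 0 (arr.length : Int) 1
      = PySem.List.pyRange 0 ((s.length - 1 : Nat) : Int) 1 ++ [((s.length - 1 : Nat) : Int)] := by
    rw [hcast1]; exact PySem.List.pyRange_one_succ_right (by omega)
  rw [haMin, haMax, ha0, hsplit, List.foldl_append]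
  have hA : (stepA (arr.length : Int) k) = (stepA (s.length : Int) k) := by rw [hslen]
  rw [hA]
  have h4 : s.getD (s.length-1) 0 - k - (s.getD 0 0 - k)
      = s.getD (s.length-1) 0 - s.getD 0 0 := by ring
  rw [h4]
  rw [invA s k (by omega) hmono (s.length - 1) (by omega) (by omega), List.foldl_cons, List.foldl_nil]
  rw [stepA_eval s k (s.length - 1) (by omega)]
  have hr1 : PySem.List.pyGetD s (-1) 0 = s.getD (s.length - 1) 0 := by
    rw [PySem.List.pyGetD_neg_ofNat s 1 0 (by omega) (by omega),
        List.getD_eq_getElem _ _ (by omega)]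
  have hr2 : PySem.List.pyGetD s (0:Int) 0 = s.getD 0 0 := by
    simp [PySem.List.pyGetD_zero]
  have hcast2 : ((arr.length : Int) - 1) = ((s.length - 1 : Nat) : Int) := by omega
  rw [hr1, hr2, hcast2]
  rw [if_pos rfl]
  have e1 : s.getD (s.length - 1 - 1) 0 ≤ s.getD (s.length - 1) 0 :=
    hmono _ _ (by omega) (by omega)
  have hif : (if min (s.getD 0 0 + k) (s.getD (s.length - 1) 0 - k) = s.getD (s.length - 1) 0 - k
        then s.getD 0 0 + k
        else min (s.getD 0 0 + k) (s.getD (s.length - 1) 0 - k)) = s.getD 0 0 + k := by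
    split_ifs with h <;> omega
  have hM : max (max (s.getD (s.length - 1) 0 - k) (s.getD (s.length - 1 - 1) 0 + k))
      (s.getD (s.length - 1) 0 + k) = s.getD (s.length - 1) 0 + k := by omega
  rw [hif, hM]
  have hdd : s.getD (s.length - 1) 0 + k - (s.getD 0 0 + k)
      = s.getD (s.length - 1) 0 - s.getD 0 0 := by ring
  rw [hdd]
  exact min_eq_left (stepB_le s k _ _)

theorem search_eq (arr : List Int) (k : Int) : search arr k = search_alt arr k := by
  by_cases hn : ((arr.length : Int) ≤ 1)
  · rw [search, search_alt, if_pos hn, if_pos hn]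
  · rcases lt_trichotomy k 0 with hk | hk | hk
    · have hk0 : ¬ (k = 0) := by omega
      rw [search, search_alt]
      simp only [if_neg hn, if_neg hk0, if_pos hk]
      exact main_pos arr (-k) (by omega) (by omega)
    · subst hk
      rw [search, search_alt]
      simp
    · exact main_pos arr k hk (by omega)

-- ===== VERDICT (by name: the statement is the Claim_ definition above) =====
theorem search_spec : Claim_equal_search := by
  intro arr k _
  unfold Spec_search
  exact search_eq arr k
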